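-- pv_equiv track=rewrite | github.com/growingCloud/dailyPractice | studyPython/20220120_Programmers/파괴되지 않은 건물_20220120_구름.py | skilling
-- ===== SOURCE A (Python) =====
-- def skilling(skill):
--     # initial skills (test)
--     skill_result = [[],[],[],[]]
--     for i in range(4):
--         for j in range(5):
--             skill_result[i].append(0)
--
--     if skill[0] == 1:
--         skill[5] *= -1
--     for i in range (skill[1], (skill[3] + 1), 1):
--         for j in range (skill[2], (skill[4] + 1), 1):
--             skill_result[i][j] = skill[5]
--             skill_result[i][j] = skill[5]
--             skill_result[i][j] = skill[5]
--             skill_result[i][j] = skill[5]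
--     return skill_result
-- ===== SOURCE B (Python) =====
-- def skilling(skill):
--     # 2D difference array + running prefix sums; same in-place sign flip of skill[5] as A.
--     if skill[0] == 1:
--         skill[5] *= -1
--     r1 = max(skill[1], 0)
--     r2 = min(skill[3], 3)
--     diff = [[0] * 6 for _ in range(5)]
--     if r1 <= r2:
--         c1 = max(skill[2], 0)
--         c2 = min(skill[4], 4)
--         if c1 <= c2:
--             val = skill[5]
--             diff[r1][c1] += val
--             diff[r1][c2 + 1] -= val
--             diff[r2 + 1][c1] -= val
--             diff[r2 + 1][c2 + 1] += val
--     out = []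
--     col = [0] * 5
--     for i in range(4):
--         run = 0
--         row = []
--         for j in range(5):
--             run += diff[i][j]
--             col[j] += run
--             row.append(col[j])
--         out.append(row)
--     return out
-- ===== Notes on version B (the rewrite author's own statement) =====
-- stated objective: alternative
-- what changed: Replaces A's direct rectangle fill (zero-init loops then a range-driven nested overwrite of the sub-rectangle) by the classic 2D difference-array technique: clamp the rectangle to the board, stamp +/-val at its four corners in a 5x6 difference array, then produce the 4x5 grid by running row and column prefix sums; the in-place sign flip of the damage entry is kept.
-- intended difference: On skills whose rectangle is nonempty but starts at a negative row/column bound that really wraps (row start < 0 with row end < 3, or column start < 0 with column end < 4) and whose damage value (sixth entry) is nonzero, A's negative indices wrap around and also fill cells at the opposite edge of the 4x5 grid, while B fills exactly the rectangle intersected with the board, which is the intended destruction area. — e.g. on skilling([0, -1, 0, 0, 4, 7]): A returns [[7, 7, 7, 7, 7], [0, 0, 0, 0, 0], [0, 0, 0, 0, 0], [7, 7, 7, 7, 7]], B returns [[7, 7, 7, 7, 7], [0, 0, 0, 0, 0], [0, 0, 0, 0, 0], [0, 0, 0, 0, 0]]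
import Mathlib
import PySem

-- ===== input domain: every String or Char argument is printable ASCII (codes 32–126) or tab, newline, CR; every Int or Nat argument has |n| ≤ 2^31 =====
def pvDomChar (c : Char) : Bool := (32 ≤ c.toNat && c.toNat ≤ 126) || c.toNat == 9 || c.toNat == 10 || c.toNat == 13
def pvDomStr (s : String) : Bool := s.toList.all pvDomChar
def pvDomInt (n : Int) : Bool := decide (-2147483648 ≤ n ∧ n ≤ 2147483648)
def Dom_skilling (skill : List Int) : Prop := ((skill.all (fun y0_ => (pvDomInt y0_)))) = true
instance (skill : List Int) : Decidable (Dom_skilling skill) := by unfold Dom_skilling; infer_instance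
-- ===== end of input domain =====

-- B replaces A's direct rectangle fill by a 2D difference array (clamp rectangle to the board,
-- stamp ±val at its four corners, then row+column prefix sums) — objective: alternative. Both A
-- and B mutate the damage entry of skill in place when its first entry is 1; the equivalence
-- proved here is about the RETURN value only.

-- ===== PORT A =====
-- Python `g[i][j] = v` (negative index allowed; a no-op index never occurs under Pre_).
def pvSetCell (g : List (List Int)) (i j v : Int) : List (List Int) :=
  PySem.List.pySetD g i (PySem.List.pySetD (PySem.List.pyGetD g i []) j v)

def skilling (skill : List Int) : List (List Int) :=
  let skill_result : List (List Int) := [[], [], [], []]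
  let skill_result := (PySem.List.pyRange 0 4 1).foldl (fun acc i =>
      (PySem.List.pyRange 0 5 1).foldl (fun acc2 _j =>
        PySem.List.pySetD acc2 i (PySem.List.pyGetD acc2 i [] ++ [0])) acc) skill_result
  let skill := if PySem.List.pyGetD skill 0 0 = 1
               then PySem.List.pySetD skill 5 (PySem.List.pyGetD skill 5 0 * (-1))
               else skill
  (PySem.List.pyRange (PySem.List.pyGetD skill 1 0) (PySem.List.pyGetD skill 3 0 + 1) 1).foldl
    (fun acc i =>
      (PySem.List.pyRange (PySem.List.pyGetD skill 2 0) (PySem.List.pyGetD skill 4 0 + 1) 1).foldl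
        (fun acc2 j =>
          pvSetCell (pvSetCell (pvSetCell (pvSetCell acc2 i j (PySem.List.pyGetD skill 5 0))
            i j (PySem.List.pyGetD skill 5 0)) i j (PySem.List.pyGetD skill 5 0))
            i j (PySem.List.pyGetD skill 5 0)) acc) skill_result

-- ===== PORT B =====
-- Python `diff[i][j] += v` / `diff[i][j] -= v` (all indices are in range in B after clamping).
def pvIncCell (g : List (List Int)) (i j v : Int) : List (List Int) :=
  PySem.List.pySetD g i
    (PySem.List.pySetD (PySem.List.pyGetD g i []) j
      (PySem.List.pyGetD (PySem.List.pyGetD g i []) j 0 + v))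

def pvDecCell (g : List (List Int)) (i j v : Int) : List (List Int) :=
  PySem.List.pySetD g i
    (PySem.List.pySetD (PySem.List.pyGetD g i []) j
      (PySem.List.pyGetD (PySem.List.pyGetD g i []) j 0 - v))

-- the four corner updates of Source B's difference array
def pvStamp (d : List (List Int)) (r1 c1 r2 c2 v : Int) : List (List Int) :=
  pvIncCell (pvDecCell (pvDecCell (pvIncCell d r1 c1 v) r1 (c2 + 1) v) (r2 + 1) c1 v)
    (r2 + 1) (c2 + 1) v

-- body of Source B's inner j-loop: state (run, row, col)
def pvStepJ (d : List (List Int)) (i : Int) (st : Int × List Int × List Int) (j : Int) :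
    Int × List Int × List Int :=
  let run := st.1 + PySem.List.pyGetD (PySem.List.pyGetD d i []) j 0
  let col := PySem.List.pySetD st.2.2 j (PySem.List.pyGetD st.2.2 j 0 + run)
  (run, st.2.1 ++ [PySem.List.pyGetD col j 0], col)

-- body of Source B's outer i-loop: state (out, col)
def pvStepI (d : List (List Int)) (st : List (List Int) × List Int) (i : Int) :
    List (List Int) × List Int :=
  let r := (PySem.List.pyRange 0 5 1).foldl (pvStepJ d i) (0, [], st.2)
  (st.1 ++ [r.2.1], r.2.2)

-- Source B's prefix-sum phase: the 4×5 grid produced from the difference array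
def pvBgrid (d : List (List Int)) : List (List Int) :=
  ((PySem.List.pyRange 0 4 1).foldl (pvStepI d) ([], List.replicate 5 0)).1

-- Source B after the sign flip, in terms of the five entries it reads: clamp the rectangle
-- to the board, stamp the corners if it is nonempty, then run the prefix-sum phase
def pvAltCore (b1 b2 b3 b4 v : Int) : List (List Int) :=
  pvBgrid
    (if max b1 0 ≤ min b3 3 then
       (if max b2 0 ≤ min b4 4 then
          pvStamp ((PySem.List.pyRange 0 5 1).map (fun _ => List.replicate 6 0))
            (max b1 0) (max b2 0) (min b3 3) (min b4 4) v
        else (PySem.List.pyRange 0 5 1).map (fun _ => List.replicate 6 0))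
     else (PySem.List.pyRange 0 5 1).map (fun _ => List.replicate 6 0))

def skilling_alt (skill : List Int) : List (List Int) :=
  let skill := if PySem.List.pyGetD skill 0 0 = 1
               then PySem.List.pySetD skill 5 (PySem.List.pyGetD skill 5 0 * (-1))
               else skill
  pvAltCore (PySem.List.pyGetD skill 1 0) (PySem.List.pyGetD skill 2 0)
    (PySem.List.pyGetD skill 3 0) (PySem.List.pyGetD skill 4 0) (PySem.List.pyGetD skill 5 0)

-- ===== PRECONDITION & SPEC =====
-- Pre_ is exactly the set of inputs on which A returns normally (no IndexError): every
-- index A actually reads exists, and when the rectangle is nonempty its bounds stay inside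
-- Python's index range for the 4x5 grid.
def Pre_skilling (skill : List Int) : Prop :=
  let b := fun k => skill.getD k 0
  4 ≤ skill.length ∧ (b 0 = 1 → 6 ≤ skill.length) ∧
  (b 3 < b 1 ∨ (5 ≤ skill.length ∧ (b 4 < b 2 ∨
    (6 ≤ skill.length ∧ -4 ≤ b 1 ∧ b 3 ≤ 3 ∧ -5 ≤ b 2 ∧ b 4 ≤ 4))))
instance (skill : List Int) : Decidable (Pre_skilling skill) := by unfold Pre_skilling; infer_instance

def pvWitness_skilling : List Int := [0, 0, 0, 0, 4, 7]

-- On nonempty rectangles with a nonzero damage value and a negative row/column start that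
-- actually wraps (row start < 0 with row end < 3, or column start < 0 with column end < 4),
-- A's negative indices wrap and also fill cells at the opposite edge of the 4x5 grid,
-- while B fills exactly the rectangle intersected with the board, which is the intended
-- destruction area.
def D_skilling (skill : List Int) : Prop :=
  let b := fun k => skill.getD k 0
  b 1 ≤ b 3 ∧ b 2 ≤ b 4 ∧ b 5 ≠ 0 ∧ ((b 1 < 0 ∧ b 3 < 3) ∨ (b 2 < 0 ∧ b 4 < 4))
instance (skill : List Int) : Decidable (D_skilling skill) := by unfold D_skilling; infer_instance

def Spec_skilling (skill : List Int) (out : List (List Int)) : Prop :=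
  ¬ D_skilling skill → out = skilling_alt skill
instance (skill : List Int) (out : List (List Int)) : Decidable (Spec_skilling skill out) := by
  unfold Spec_skilling; infer_instance

def pvDiffWitness_skilling : List Int := [0, -1, 0, 0, 4, 7]
def pvDiffWitnessOut_skilling : (List (List Int)) × (List (List Int)) :=
  ([[7, 7, 7, 7, 7], [0, 0, 0, 0, 0], [0, 0, 0, 0, 0], [7, 7, 7, 7, 7]],
   [[7, 7, 7, 7, 7], [0, 0, 0, 0, 0], [0, 0, 0, 0, 0], [0, 0, 0, 0, 0]])

-- ===== CLAIM (what is proved, stated in full; the proofs are below) =====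
def Claim_unchanged_skilling : Prop :=
  ∀ (skill : List Int), Dom_skilling skill → Pre_skilling skill → Spec_skilling skill (skilling skill)
def Claim_changed_skilling : Prop :=
  Dom_skilling (pvDiffWitness_skilling) ∧ Pre_skilling (pvDiffWitness_skilling) ∧
  D_skilling (pvDiffWitness_skilling) ∧
  skilling (pvDiffWitness_skilling) = pvDiffWitnessOut_skilling.1 ∧
  skilling_alt (pvDiffWitness_skilling) = pvDiffWitnessOut_skilling.2 ∧
  pvDiffWitnessOut_skilling.1 ≠ pvDiffWitnessOut_skilling.2
def Claim_exact_skilling : Prop :=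
  ∀ (skill : List Int), Dom_skilling skill → Pre_skilling skill → D_skilling skill →
    skilling skill ≠ skilling_alt skill

-- ===== LEMMAS AND PROOFS =====

theorem pvIdx_lt (n : Nat) (i : Int) (k : Nat) (h : PySem.List.pyIdx? n i = some k) : k < n := by
  unfold PySem.List.pyIdx? at h
  split_ifs at h <;> simp_all <;> omega

theorem pv_setD_some {α : Type} (xs : List α) (i : Int) (k : Nat) (x : α)
    (h : PySem.List.pyIdx? xs.length i = some k) : PySem.List.pySetD xs i x = xs.set k x := by
  simp [PySem.List.pySetD, PySem.List.pySet?, h]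

theorem pv_setD_none {α : Type} (xs : List α) (i : Int) (x : α)
    (h : PySem.List.pyIdx? xs.length i = none) : PySem.List.pySetD xs i x = xs := by
  simp [PySem.List.pySetD, PySem.List.pySet?, h]

theorem pv_getD_some {α : Type} (xs : List α) (i : Int) (k : Nat) (d : α)
    (h : PySem.List.pyIdx? xs.length i = some k) (hk : k < xs.length) :
    PySem.List.pyGetD xs i d = xs[k] := by
  simp [PySem.List.pyGetD, PySem.List.pyGet?, h, List.getElem?_eq_getElem hk]

-- row after the inner loop, run from the all-zero row
def pvRow (b2 b4 v : Int) : List Int :=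
  (PySem.List.pyRange b2 (b4 + 1) 1).foldl (fun r j => PySem.List.pySetD r j v) [0, 0, 0, 0, 0]

-- grid whose rows hit so far (f) carry pvRow, the others the zero row
def pvG (f : Int → Bool) (b2 b4 v : Int) : List (List Int) :=
  (PySem.List.pyRange 0 4 1).map (fun r => if f r then pvRow b2 b4 v else [0, 0, 0, 0, 0])

theorem pvSetD_idem {α : Type} (r : List α) (j : Int) (v : α) :
    PySem.List.pySetD (PySem.List.pySetD r j v) j v = PySem.List.pySetD r j v := by
  cases h : PySem.List.pyIdx? r.length j with
  | none => rw [pv_setD_none r j v h, pv_setD_none r j v h]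
  | some k =>
      rw [pv_setD_some r j k v h, pv_setD_some _ j k v (by simpa using h), List.set_set]

theorem pv_inner (i v : Int) (L : List Int) (g : List (List Int)) :
    L.foldl (fun acc j => pvSetCell (pvSetCell (pvSetCell (pvSetCell acc i j v) i j v) i j v) i j v) g
      = PySem.List.pySetD g i
          (L.foldl (fun r j => PySem.List.pySetD r j v) (PySem.List.pyGetD g i [])) := by
  induction L generalizing g with
  | nil =>
      cases h : PySem.List.pyIdx? g.length i with
      | none => rw [List.foldl_nil, List.foldl_nil, pv_setD_none g i _ h]
      | some k =>
          have hk := pvIdx_lt _ _ _ h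
          rw [List.foldl_nil, List.foldl_nil, pv_getD_some g i k [] h hk,
            pv_setD_some g i k _ h, List.set_getElem_self]
  | cons j L ih =>
      cases h : PySem.List.pyIdx? g.length i with
      | none =>
          have hcell : ∀ x : List (List Int), PySem.List.pyIdx? x.length i = none →
              ∀ jj : Int, pvSetCell x i jj v = x := by
            intro x hx jj; unfold pvSetCell; exact pv_setD_none x i _ hx
          rw [List.foldl_cons, hcell g h, hcell g h, hcell g h, hcell g h, ih g,
            pv_setD_none g i _ h, pv_setD_none g i _ h]
      | some k =>
          have hk := pvIdx_lt _ _ _ h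
          have hidx : ∀ x : List Int, PySem.List.pyIdx? (g.set k x).length i = some k := by
            intro x; rw [List.length_set]; exact h
          have hk' : ∀ x : List Int, k < (g.set k x).length := by
            intro x; simpa using hk
          have e1 : pvSetCell g i j v = g.set k (PySem.List.pySetD g[k] j v) := by
            unfold pvSetCell
            rw [pv_getD_some g i k [] h hk, pv_setD_some g i k _ h]
          have e2 : ∀ x : List Int, pvSetCell (g.set k x) i j v
              = g.set k (PySem.List.pySetD x j v) := by
            intro x; unfold pvSetCell
            rw [pv_getD_some _ i k [] (hidx x) (hk' x), pv_setD_some _ i k _ (hidx x),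
              List.set_set, List.getElem_set_self]
          rw [List.foldl_cons, e1, e2, pvSetD_idem, e2, pvSetD_idem, e2, pvSetD_idem,
            ih (g.set k (PySem.List.pySetD g[k] j v)),
            pv_getD_some _ i k [] (hidx _) (hk' _),
            pv_setD_some _ i k _ (hidx _), List.set_set, List.getElem_set_self,
            pv_getD_some g i k [] h hk, List.foldl_cons, pv_setD_some g i k _ h]

def pvRowPat (b2 b4 : Int) : List Bool :=
  (PySem.List.pyRange b2 (b4 + 1) 1).foldl (fun r j => PySem.List.pySetD r j true)
    [false, false, false, false, false]

theorem pv_setD_map {α β : Type} (f : α → β) (xs : List α) (j : Int) (x : α) :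
    PySem.List.pySetD (xs.map f) j (f x) = (PySem.List.pySetD xs j x).map f := by
  cases h : PySem.List.pyIdx? xs.length j with
  | none =>
      rw [pv_setD_none _ j _ (by rw [List.length_map]; exact h), pv_setD_none xs j x h]
  | some k =>
      rw [pv_setD_some _ j k _ (by rw [List.length_map]; exact h), pv_setD_some xs j k x h,
        List.map_set]

theorem pv_fold_render (v : Int) (L : List Int) (p : List Bool) :
    L.foldl (fun r j => PySem.List.pySetD r j v) (p.map (fun b => if b then v else 0))
      = (L.foldl (fun r j => PySem.List.pySetD r j true) p).map (fun b => if b then v else 0) := by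
  exact List.foldl_hom _ (fun x y => pv_setD_map (fun b => if b then v else 0) x y true)

theorem pv_row_render (b2 b4 v : Int) :
    pvRow b2 b4 v = (pvRowPat b2 b4).map (fun b => if b then v else 0) := by
  unfold pvRow pvRowPat
  rw [← pv_fold_render]
  norm_num

set_option maxRecDepth 40000 in
theorem pv_rowpat_abs : ∀ b2 ∈ Finset.Icc (-5:Int) 4, ∀ b4 ∈ Finset.Icc (-5:Int) 4,
    (PySem.List.pyRange b2 (b4 + 1) 1).foldl (fun r j => PySem.List.pySetD r j true)
      (pvRowPat b2 b4) = pvRowPat b2 b4 := by decide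

set_option maxRecDepth 40000 in
theorem pv_rowpat_eq : ∀ b2 ∈ Finset.Icc (-5:Int) 4, ∀ b4 ∈ Finset.Icc (-5:Int) 4,
    pvRowPat b2 b4 = (PySem.List.pyRange 0 5 1).map
      (fun j => decide ((b2 ≤ j ∧ j ≤ b4) ∨ (b2 ≤ j - 5 ∧ j - 5 ≤ b4))) := by decide

theorem pv_row_abs (b2 b4 v : Int) (h : -5 ≤ b2 ∧ b2 ≤ 4 ∧ -5 ≤ b4 ∧ b4 ≤ 4) :
    (PySem.List.pyRange b2 (b4 + 1) 1).foldl (fun r j => PySem.List.pySetD r j v) (pvRow b2 b4 v)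
      = pvRow b2 b4 v := by
  rw [pv_row_render, pv_fold_render,
    pv_rowpat_abs b2 (Finset.mem_Icc.mpr ⟨by omega, by omega⟩)
      b4 (Finset.mem_Icc.mpr ⟨by omega, by omega⟩), ← pv_row_render]

theorem pv_row_eq (b2 b4 v : Int) (h : -5 ≤ b2 ∧ b2 ≤ 4 ∧ -5 ≤ b4 ∧ b4 ≤ 4) :
    pvRow b2 b4 v = (PySem.List.pyRange 0 5 1).map
      (fun j => if (b2 ≤ j ∧ j ≤ b4) ∨ (b2 ≤ j - 5 ∧ j - 5 ≤ b4) then v else 0) := by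
  rw [pv_row_render,
    pv_rowpat_eq b2 (Finset.mem_Icc.mpr ⟨by omega, by omega⟩)
      b4 (Finset.mem_Icc.mpr ⟨by omega, by omega⟩), List.map_map]
  simp [Function.comp_def]

theorem pv_lenG (b2 b4 v : Int) (f : Int → Bool) : (pvG f b2 b4 v).length = 4 := by
  simp [pvG, (by decide : PySem.List.pyRange 0 4 1 = [0,1,2,3])]

theorem pv_getG (b2 b4 v : Int) (f : Int → Bool) (i : Int) (k : Nat)
    (h : PySem.List.pyIdx? 4 i = some k) (hk : k < 4) :
    PySem.List.pyGetD (pvG f b2 b4 v) i []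
      = if f (k : Int) then pvRow b2 b4 v else [0,0,0,0,0] := by
  rw [pv_getD_some _ i k [] (by rw [pv_lenG]; exact h) (by rw [pv_lenG]; exact hk)]
  simp [pvG, (by decide : PySem.List.pyRange 0 4 1 = [0,1,2,3])]
  interval_cases k <;> simp

theorem pv_setG (b2 b4 v : Int) (f : Int → Bool) (i : Int) (k : Nat) (X : List Int)
    (h : PySem.List.pyIdx? 4 i = some k) :
    PySem.List.pySetD (pvG f b2 b4 v) i X = (pvG f b2 b4 v).set k X := by
  apply pv_setD_some; rw [pv_lenG]; exact h

theorem pv_step (b2 b4 v : Int) (hb : -5 ≤ b2 ∧ b2 ≤ 4 ∧ -5 ≤ b4 ∧ b4 ≤ 4) (f : Int → Bool)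
    (i : Int) (hi : -4 ≤ i ∧ i ≤ 3) :
    PySem.List.pySetD (pvG f b2 b4 v) i
      ((PySem.List.pyRange b2 (b4 + 1) 1).foldl (fun r j => PySem.List.pySetD r j v)
        (PySem.List.pyGetD (pvG f b2 b4 v) i []))
    = pvG (fun r => f r || decide (i = r ∨ i + 4 = r)) b2 b4 v := by
  obtain ⟨h1, h2⟩ := hi
  have hrow : ∀ c : Bool, (PySem.List.pyRange b2 (b4 + 1) 1).foldl
      (fun r j => PySem.List.pySetD r j v) (if c then pvRow b2 b4 v else [0,0,0,0,0])
      = pvRow b2 b4 v := by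
    intro c
    cases c
    · rw [if_neg (by simp)]; rfl
    · rw [if_pos rfl]; exact pv_row_abs b2 b4 v hb
  have hR : PySem.List.pyRange 0 4 1 = [0,1,2,3] := by decide
  interval_cases i
  · rw [pv_getG b2 b4 v f (-4) 0 (by decide) (by decide), hrow,
      pv_setG b2 b4 v f (-4) 0 _ (by decide)]
    simp [pvG, hR]
  · rw [pv_getG b2 b4 v f (-3) 1 (by decide) (by decide), hrow,
      pv_setG b2 b4 v f (-3) 1 _ (by decide)]
    simp [pvG, hR]
  · rw [pv_getG b2 b4 v f (-2) 2 (by decide) (by decide), hrow,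
      pv_setG b2 b4 v f (-2) 2 _ (by decide)]
    simp [pvG, hR]
  · rw [pv_getG b2 b4 v f (-1) 3 (by decide) (by decide), hrow,
      pv_setG b2 b4 v f (-1) 3 _ (by decide)]
    simp [pvG, hR]
  · rw [pv_getG b2 b4 v f 0 0 (by decide) (by decide), hrow,
      pv_setG b2 b4 v f 0 0 _ (by decide)]
    simp [pvG, hR]
  · rw [pv_getG b2 b4 v f 1 1 (by decide) (by decide), hrow,
      pv_setG b2 b4 v f 1 1 _ (by decide)]
    simp [pvG, hR]
  · rw [pv_getG b2 b4 v f 2 2 (by decide) (by decide), hrow,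
      pv_setG b2 b4 v f 2 2 _ (by decide)]
    simp [pvG, hR]
  · rw [pv_getG b2 b4 v f 3 3 (by decide) (by decide), hrow,
      pv_setG b2 b4 v f 3 3 _ (by decide)]
    simp [pvG, hR]

theorem pv_outer (b2 b4 v : Int) (hb : -5 ≤ b2 ∧ b2 ≤ 4 ∧ -5 ≤ b4 ∧ b4 ≤ 4)
    (L : List Int) (hL : ∀ i ∈ L, -4 ≤ i ∧ i ≤ 3) (f : Int → Bool) :
    L.foldl (fun acc i =>
        (PySem.List.pyRange b2 (b4 + 1) 1).foldl
          (fun acc2 j => pvSetCell (pvSetCell (pvSetCell (pvSetCell acc2 i j v) i j v) i j v) i j v)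
          acc)
      (pvG f b2 b4 v)
      = pvG (fun r => f r || L.any (fun i => decide (i = r ∨ i + 4 = r))) b2 b4 v := by
  induction L generalizing f with
  | nil => simp
  | cons i L ih =>
      rw [List.foldl_cons, pv_inner i v _ (pvG f b2 b4 v),
        pv_step b2 b4 v hb f i (hL i (List.mem_cons_self)),
        ih (fun x hx => hL x (List.mem_cons_of_mem _ hx))]
      simp [List.any_cons, Bool.or_assoc]

theorem pv_cell (b1 b2 b3 b4 v r j : Int)
    (hv : v = 0 ∨ ((0 ≤ b1 ∨ b3 = 3) ∧ (0 ≤ b2 ∨ b4 = 4)))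
    (hr : 0 ≤ r ∧ r ≤ 3) (hj : 0 ≤ j ∧ j ≤ 4)
    (hrow : (b1 ≤ r ∧ r ≤ b3) ∨ (b1 ≤ r - 4 ∧ r - 4 ≤ b3)) :
    (if (b2 ≤ j ∧ j ≤ b4) ∨ (b2 ≤ j - 5 ∧ j - 5 ≤ b4) then v else 0)
      = if b1 ≤ r ∧ r ≤ b3 ∧ b2 ≤ j ∧ j ≤ b4 then v else 0 := by
  rcases hv with rfl | ⟨hw1, hw2⟩
  · simp
  · split_ifs with hA hB hB
    · rfl
    · exact absurd (by omega : b1 ≤ r ∧ r ≤ b3 ∧ b2 ≤ j ∧ j ≤ b4) hB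
    · exact absurd (by omega : (b2 ≤ j ∧ j ≤ b4) ∨ (b2 ≤ j - 5 ∧ j - 5 ≤ b4)) hA
    · rfl

theorem pv_rowcase (b1 b2 b3 b4 v r : Int)
    (hb : -5 ≤ b2 ∧ b2 ≤ 4 ∧ -5 ≤ b4 ∧ b4 ≤ 4)
    (hv : v = 0 ∨ ((0 ≤ b1 ∨ b3 = 3) ∧ (0 ≤ b2 ∨ b4 = 4)))
    (hr : 0 ≤ r ∧ r ≤ 3) :
    (if decide ((b1 ≤ r ∧ r ≤ b3) ∨ (b1 ≤ r - 4 ∧ r - 4 ≤ b3)) then pvRow b2 b4 v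
     else [0,0,0,0,0])
      = (PySem.List.pyRange 0 5 1).map
          (fun j => if b1 ≤ r ∧ r ≤ b3 ∧ b2 ≤ j ∧ j ≤ b4 then v else 0) := by
  by_cases hrow : (b1 ≤ r ∧ r ≤ b3) ∨ (b1 ≤ r - 4 ∧ r - 4 ≤ b3)
  · rw [if_pos (by simpa using hrow), pv_row_eq b2 b4 v hb,
      (by decide : PySem.List.pyRange 0 5 1 = [0,1,2,3,4])]
    have hc : ∀ j : Int, 0 ≤ j → j ≤ 4 →
        (if (b2 ≤ j ∧ j ≤ b4) ∨ (b2 ≤ j - 5 ∧ j - 5 ≤ b4) then v else 0)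
          = if b1 ≤ r ∧ r ≤ b3 ∧ b2 ≤ j ∧ j ≤ b4 then v else 0 := by
      intro j hj1 hj2; exact pv_cell b1 b2 b3 b4 v r j hv hr ⟨hj1, hj2⟩ hrow
    simp only [List.map_cons, List.map_nil]
    rw [hc 0 (by omega) (by omega), hc 1 (by omega) (by omega), hc 2 (by omega) (by omega),
      hc 3 (by omega) (by omega), hc 4 (by omega) (by omega)]
  · rw [if_neg (by simpa using hrow)]
    have hz : ∀ j : Int, (if b1 ≤ r ∧ r ≤ b3 ∧ b2 ≤ j ∧ j ≤ b4 then v else 0) = 0 := by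
      intro j; rw [if_neg]; intro hcon; exact hrow (Or.inl ⟨hcon.1, hcon.2.1⟩)
    rw [(by decide : PySem.List.pyRange 0 5 1 = [0,1,2,3,4])]
    simp only [List.map_cons, List.map_nil, hz]

set_option maxRecDepth 40000 in
theorem pv_A_map (b1 b2 b3 b4 v : Int)
    (hb : -4 ≤ b1 ∧ b3 ≤ 3 ∧ -5 ≤ b2 ∧ b4 ≤ 4) (h13 : b1 ≤ b3) (h24 : b2 ≤ b4) :
    (PySem.List.pyRange b1 (b3 + 1) 1).foldl
        (fun acc i =>
          (PySem.List.pyRange b2 (b4 + 1) 1).foldl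
            (fun acc2 j => pvSetCell (pvSetCell (pvSetCell (pvSetCell acc2 i j v) i j v) i j v) i j v)
            acc)
        ((PySem.List.pyRange 0 4 1).foldl (fun acc i =>
          (PySem.List.pyRange 0 5 1).foldl (fun acc2 _j =>
            PySem.List.pySetD acc2 i (PySem.List.pyGetD acc2 i [] ++ [0])) acc) [[], [], [], []])
      = (PySem.List.pyRange 0 4 1).map (fun r =>
          if decide ((b1 ≤ r ∧ r ≤ b3) ∨ (b1 ≤ r - 4 ∧ r - 4 ≤ b3)) then pvRow b2 b4 v
          else [0,0,0,0,0]) := by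
  have hb' : -5 ≤ b2 ∧ b2 ≤ 4 ∧ -5 ≤ b4 ∧ b4 ≤ 4 := by omega
  have hinit : ((PySem.List.pyRange 0 4 1).foldl (fun acc i =>
      (PySem.List.pyRange 0 5 1).foldl (fun acc2 _j =>
        PySem.List.pySetD acc2 i (PySem.List.pyGetD acc2 i [] ++ [0])) acc) [[], [], [], []])
      = pvG (fun _ => false) b2 b4 v := by
    rw [show pvG (fun _ => false) b2 b4 v
        = [[0,0,0,0,0],[0,0,0,0,0],[0,0,0,0,0],[0,0,0,0,0]] from by
      simp [pvG, (by decide : PySem.List.pyRange 0 4 1 = [0,1,2,3])]]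
    decide
  rw [hinit, pv_outer b2 b4 v hb' _
    (fun i hi => by rw [PySem.List.mem_pyRange_one] at hi; omega) (fun _ => false)]
  simp only [Bool.false_or]
  have hany : ∀ r : Int, ((PySem.List.pyRange b1 (b3 + 1) 1).any
      (fun i => decide (i = r ∨ i + 4 = r)))
      = decide ((b1 ≤ r ∧ r ≤ b3) ∨ (b1 ≤ r - 4 ∧ r - 4 ≤ b3)) := by
    intro r
    rw [Bool.eq_iff_iff]
    simp only [List.any_eq_true, PySem.List.mem_pyRange_one, decide_eq_true_eq]
    constructor
    · rintro ⟨i, hi, h | h⟩ <;> [left; right] <;> omega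
    · rintro (⟨hh1, hh2⟩ | ⟨hh1, hh2⟩)
      · exact ⟨r, ⟨by omega, by omega⟩, Or.inl rfl⟩
      · exact ⟨r - 4, ⟨by omega, by omega⟩, Or.inr (by omega)⟩
  simp only [pvG, hany]

set_option maxRecDepth 40000 in
theorem pv_core (b1 b2 b3 b4 v : Int)
    (hpre : b3 < b1 ∨ b4 < b2 ∨ (-4 ≤ b1 ∧ b3 ≤ 3 ∧ -5 ≤ b2 ∧ b4 ≤ 4))
    (hnd : v = 0 ∨ b3 < b1 ∨ b4 < b2 ∨ ((0 ≤ b1 ∨ b3 = 3) ∧ (0 ≤ b2 ∨ b4 = 4))) :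
    (PySem.List.pyRange b1 (b3 + 1) 1).foldl
        (fun acc i =>
          (PySem.List.pyRange b2 (b4 + 1) 1).foldl
            (fun acc2 j => pvSetCell (pvSetCell (pvSetCell (pvSetCell acc2 i j v) i j v) i j v) i j v)
            acc)
        ((PySem.List.pyRange 0 4 1).foldl (fun acc i =>
          (PySem.List.pyRange 0 5 1).foldl (fun acc2 _j =>
            PySem.List.pySetD acc2 i (PySem.List.pyGetD acc2 i [] ++ [0])) acc) [[], [], [], []])
      = (PySem.List.pyRange 0 4 1).map (fun i =>
          (PySem.List.pyRange 0 5 1).map (fun j =>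
            if b1 ≤ i ∧ i ≤ b3 ∧ b2 ≤ j ∧ j ≤ b4 then v else 0)) := by
  by_cases hE1 : b3 < b1
  · rw [show PySem.List.pyRange b1 (b3 + 1) 1 = [] from
      PySem.List.pyRange_one_eq_nil (by omega), List.foldl_nil]
    have hz : ∀ i j : Int, (if b1 ≤ i ∧ i ≤ b3 ∧ b2 ≤ j ∧ j ≤ b4 then v else 0) = 0 := by
      intro i j; rw [if_neg]; omega
    simp only [hz]
    decide
  · by_cases hE2 : b4 < b2
    · simp only [PySem.List.pyRange_one_eq_nil (show b4 + 1 ≤ b2 by omega), List.foldl_nil]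
      rw [List.foldl_fixed]
      have hz : ∀ i j : Int, (if b1 ≤ i ∧ i ≤ b3 ∧ b2 ≤ j ∧ j ≤ b4 then v else 0) = 0 := by
        intro i j; rw [if_neg]; omega
      simp only [hz]
      decide
    · have hb : -4 ≤ b1 ∧ b3 ≤ 3 ∧ -5 ≤ b2 ∧ b4 ≤ 4 := by
        rcases hpre with h | h | h
        · omega
        · omega
        · exact h
      have hv : v = 0 ∨ ((0 ≤ b1 ∨ b3 = 3) ∧ (0 ≤ b2 ∨ b4 = 4)) := by
        rcases hnd with h | h | h | h
        · exact Or.inl h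
        · omega
        · omega
        · exact Or.inr h
      have hb' : -5 ≤ b2 ∧ b2 ≤ 4 ∧ -5 ≤ b4 ∧ b4 ≤ 4 := by omega
      rw [pv_A_map b1 b2 b3 b4 v hb (by omega) (by omega),
        (by decide : PySem.List.pyRange 0 4 1 = [0,1,2,3])]
      simp only [List.map_cons, List.map_nil]
      rw [pv_rowcase b1 b2 b3 b4 v 0 hb' hv (by omega),
        pv_rowcase b1 b2 b3 b4 v 1 hb' hv (by omega),
        pv_rowcase b1 b2 b3 b4 v 2 hb' hv (by omega),
        pv_rowcase b1 b2 b3 b4 v 3 hb' hv (by omega)]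

-- ---- B-side: linearity in v, then a finite check of the v = 1 patterns ----

theorem pv_incCell_map (g : List (List Int)) (i j v x : Int) :
    pvIncCell (g.map (List.map (fun t => v * t))) i j (v * x)
      = (pvIncCell g i j x).map (List.map (fun t => v * t)) := by
  unfold pvIncCell
  rw [show ([] : List Int) = List.map (fun t => v * t) [] from rfl,
    PySem.List.pyGetD_map (List.map (fun t => v * t)) g i [],
    show (0 : Int) = v * 0 from (mul_zero v).symm,
    PySem.List.pyGetD_map (fun t => v * t) (PySem.List.pyGetD g i []) j 0,
    show v * (PySem.List.pyGetD (PySem.List.pyGetD g i []) j 0) + v * x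
        = v * (PySem.List.pyGetD (PySem.List.pyGetD g i []) j 0 + x) from (mul_add v _ _).symm,
    pv_setD_map (fun t => v * t) (PySem.List.pyGetD g i []) j _,
    pv_setD_map (List.map (fun t => v * t)) g i _]
  simp

theorem pv_decCell_map (g : List (List Int)) (i j v x : Int) :
    pvDecCell (g.map (List.map (fun t => v * t))) i j (v * x)
      = (pvDecCell g i j x).map (List.map (fun t => v * t)) := by
  unfold pvDecCell
  rw [show ([] : List Int) = List.map (fun t => v * t) [] from rfl,
    PySem.List.pyGetD_map (List.map (fun t => v * t)) g i [],
    show (0 : Int) = v * 0 from (mul_zero v).symm,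
    PySem.List.pyGetD_map (fun t => v * t) (PySem.List.pyGetD g i []) j 0,
    show v * (PySem.List.pyGetD (PySem.List.pyGetD g i []) j 0) - v * x
        = v * (PySem.List.pyGetD (PySem.List.pyGetD g i []) j 0 - x) from (mul_sub v _ _).symm,
    pv_setD_map (fun t => v * t) (PySem.List.pyGetD g i []) j _,
    pv_setD_map (List.map (fun t => v * t)) g i _]
  simp

theorem pv_stamp_map (g : List (List Int)) (r1 c1 r2 c2 v x : Int) :
    pvStamp (g.map (List.map (fun t => v * t))) r1 c1 r2 c2 (v * x)
      = (pvStamp g r1 c1 r2 c2 x).map (List.map (fun t => v * t)) := by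
  unfold pvStamp
  rw [pv_incCell_map, pv_decCell_map, pv_decCell_map, pv_incCell_map]

theorem pv_stepJ_fold_map (d : List (List Int)) (v i : Int) (L : List Int) :
    ∀ (run : Int) (row col : List Int),
      L.foldl (pvStepJ (d.map (List.map (fun t => v * t))) i)
        (v * run, row.map (fun t => v * t), col.map (fun t => v * t))
      = (v * (L.foldl (pvStepJ d i) (run, row, col)).1,
         (L.foldl (pvStepJ d i) (run, row, col)).2.1.map (fun t => v * t),
         (L.foldl (pvStepJ d i) (run, row, col)).2.2.map (fun t => v * t)) := by
  induction L with
  | nil => intro run row col; simp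
  | cons j L ih =>
      intro run row col
      rw [List.foldl_cons, List.foldl_cons]
      have hD : PySem.List.pyGetD (PySem.List.pyGetD (d.map (List.map (fun t => v * t))) i []) j 0
          = v * PySem.List.pyGetD (PySem.List.pyGetD d i []) j 0 := by
        rw [show ([] : List Int) = List.map (fun t => v * t) [] from rfl,
          PySem.List.pyGetD_map (List.map (fun t => v * t)) d i [],
          show (0 : Int) = v * 0 from (mul_zero v).symm,
          PySem.List.pyGetD_map (fun t => v * t) (PySem.List.pyGetD d i []) j 0]
        simp
      have hCget : PySem.List.pyGetD (col.map (fun t => v * t)) j 0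
          = v * PySem.List.pyGetD col j 0 := by
        rw [show (0 : Int) = v * 0 from (mul_zero v).symm,
          PySem.List.pyGetD_map (fun t => v * t) col j 0]
        simp
      have hstep : pvStepJ (d.map (List.map (fun t => v * t))) i
          (v * run, row.map (fun t => v * t), col.map (fun t => v * t)) j
          = (v * (pvStepJ d i (run, row, col) j).1,
             (pvStepJ d i (run, row, col) j).2.1.map (fun t => v * t),
             (pvStepJ d i (run, row, col) j).2.2.map (fun t => v * t)) := by
        unfold pvStepJ
        simp only [hD, hCget]
        rw [show v * run + v * PySem.List.pyGetD (PySem.List.pyGetD d i []) j 0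
            = v * (run + PySem.List.pyGetD (PySem.List.pyGetD d i []) j 0) from (mul_add v _ _).symm,
          show v * PySem.List.pyGetD col j 0
              + v * (run + PySem.List.pyGetD (PySem.List.pyGetD d i []) j 0)
            = v * (PySem.List.pyGetD col j 0
              + (run + PySem.List.pyGetD (PySem.List.pyGetD d i []) j 0)) from (mul_add v _ _).symm,
          pv_setD_map (fun t => v * t) col j _]
        rw [show (0 : Int) = v * 0 from (mul_zero v).symm,
          PySem.List.pyGetD_map (fun t => v * t) (PySem.List.pySetD col j _) j 0]
        simp [List.map_append]
      rw [hstep, ih]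

theorem pv_stepI_fold_map (d : List (List Int)) (v : Int) (L : List Int) :
    ∀ (out : List (List Int)) (col : List Int),
      L.foldl (pvStepI (d.map (List.map (fun t => v * t))))
        (out.map (List.map (fun t => v * t)), col.map (fun t => v * t))
      = ((L.foldl (pvStepI d) (out, col)).1.map (List.map (fun t => v * t)),
         (L.foldl (pvStepI d) (out, col)).2.map (fun t => v * t)) := by
  induction L with
  | nil => intro out col; simp
  | cons i L ih =>
      intro out col
      rw [List.foldl_cons, List.foldl_cons]
      have hstep : pvStepI (d.map (List.map (fun t => v * t)))
          (out.map (List.map (fun t => v * t)), col.map (fun t => v * t)) i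
          = ((pvStepI d (out, col) i).1.map (List.map (fun t => v * t)),
             (pvStepI d (out, col) i).2.map (fun t => v * t)) := by
        unfold pvStepI
        have h0 : (0 : Int) = v * 0 := (mul_zero v).symm
        have h1 : ([] : List Int) = List.map (fun t => v * t) [] := rfl
        rw [show ((0 : Int), ([] : List Int), col.map (fun t => v * t))
            = (v * 0, List.map (fun t => v * t) [], col.map (fun t => v * t)) from by
          rw [← h0]; rfl]
        rw [pv_stepJ_fold_map d v i (PySem.List.pyRange 0 5 1) 0 [] col]
        simp [List.map_append]
      rw [hstep, ih]

theorem pv_Bgrid_map (d : List (List Int)) (v : Int) :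
    pvBgrid (d.map (List.map (fun t => v * t)))
      = (pvBgrid d).map (List.map (fun t => v * t)) := by
  unfold pvBgrid
  have h := pv_stepI_fold_map d v (PySem.List.pyRange 0 4 1) [] (List.replicate 5 0)
  simp only [List.map_nil] at h
  rw [show (List.replicate 5 (0 : Int)).map (fun t => v * t) = List.replicate 5 0 from by simp] at h
  rw [h]

theorem pv_zeros_map (v : Int) :
    ((PySem.List.pyRange 0 5 1).map (fun _ => List.replicate 6 (0 : Int)))
      = ((PySem.List.pyRange 0 5 1).map (fun _ => List.replicate 6 (0 : Int))).map
          (List.map (fun t => v * t)) := by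
  simp

set_option maxRecDepth 100000 in
theorem pv_B_pat : ∀ r1 ∈ Finset.Icc (0:Int) 3, ∀ r2 ∈ Finset.Icc (0:Int) 3,
    ∀ c1 ∈ Finset.Icc (0:Int) 4, ∀ c2 ∈ Finset.Icc (0:Int) 4, r1 ≤ r2 → c1 ≤ c2 →
    pvBgrid (pvStamp ((PySem.List.pyRange 0 5 1).map (fun _ => List.replicate 6 (0 : Int)))
        r1 c1 r2 c2 1)
      = (PySem.List.pyRange 0 4 1).map (fun i => (PySem.List.pyRange 0 5 1).map (fun j =>
          if r1 ≤ i ∧ i ≤ r2 ∧ c1 ≤ j ∧ j ≤ c2 then (1:Int) else 0)) := by decide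

set_option maxRecDepth 40000 in
theorem pv_Bgrid_zero :
    pvBgrid ((PySem.List.pyRange 0 5 1).map (fun _ => List.replicate 6 (0 : Int)))
      = (PySem.List.pyRange 0 4 1).map
          (fun _ => (PySem.List.pyRange 0 5 1).map (fun _ => (0 : Int))) := by decide

theorem pv_B (b1 b2 b3 b4 v : Int) :
    pvAltCore b1 b2 b3 b4 v
      = (PySem.List.pyRange 0 4 1).map (fun i =>
          (PySem.List.pyRange 0 5 1).map (fun j =>
            if b1 ≤ i ∧ i ≤ b3 ∧ b2 ≤ j ∧ j ≤ b4 then v else 0)) := by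
  unfold pvAltCore
  by_cases hg1 : max b1 0 ≤ min b3 3
  · by_cases hg2 : max b2 0 ≤ min b4 4
    · rw [if_pos hg1, if_pos hg2]
      have hv1 : v = v * 1 := (mul_one v).symm
      calc
        pvBgrid (pvStamp ((PySem.List.pyRange 0 5 1).map (fun _ => List.replicate 6 (0 : Int)))
            (max b1 0) (max b2 0) (min b3 3) (min b4 4) v)
            = pvBgrid ((pvStamp ((PySem.List.pyRange 0 5 1).map
                (fun _ => List.replicate 6 (0 : Int)))
                (max b1 0) (max b2 0) (min b3 3) (min b4 4) 1).map
                  (List.map (fun t => v * t))) := by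
              rw [← pv_stamp_map, ← pv_zeros_map, ← hv1]
        _ = (pvBgrid (pvStamp ((PySem.List.pyRange 0 5 1).map
                (fun _ => List.replicate 6 (0 : Int)))
                (max b1 0) (max b2 0) (min b3 3) (min b4 4) 1)).map
                  (List.map (fun t => v * t)) := pv_Bgrid_map _ v
        _ = ((PySem.List.pyRange 0 4 1).map (fun i => (PySem.List.pyRange 0 5 1).map (fun j =>
              if max b1 0 ≤ i ∧ i ≤ min b3 3 ∧ max b2 0 ≤ j ∧ j ≤ min b4 4 then (1:Int)
              else 0))).map (List.map (fun t => v * t)) := by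
              rw [pv_B_pat (max b1 0) (Finset.mem_Icc.mpr ⟨by omega, by omega⟩)
                (min b3 3) (Finset.mem_Icc.mpr ⟨by omega, by omega⟩)
                (max b2 0) (Finset.mem_Icc.mpr ⟨by omega, by omega⟩)
                (min b4 4) (Finset.mem_Icc.mpr ⟨by omega, by omega⟩) hg1 hg2]
        _ = (PySem.List.pyRange 0 4 1).map (fun i =>
              (PySem.List.pyRange 0 5 1).map (fun j =>
                if b1 ≤ i ∧ i ≤ b3 ∧ b2 ≤ j ∧ j ≤ b4 then v else 0)) := by
              rw [List.map_map]
              apply List.map_congr_left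
              intro i hi
              rw [PySem.List.mem_pyRange_one] at hi
              simp only [Function.comp_def, List.map_map]
              apply List.map_congr_left
              intro j hj
              rw [PySem.List.mem_pyRange_one] at hj
              simp only [mul_ite, mul_one, mul_zero]
              split_ifs with hA hB hB
              · rfl
              · exact absurd (by omega : b1 ≤ i ∧ i ≤ b3 ∧ b2 ≤ j ∧ j ≤ b4) hB
              · exact absurd (by omega : max b1 0 ≤ i ∧ i ≤ min b3 3 ∧ max b2 0 ≤ j ∧
                  j ≤ min b4 4) hA
              · rfl
    · rw [if_pos hg1, if_neg hg2, pv_Bgrid_zero]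
      apply List.map_congr_left
      intro i hi
      rw [PySem.List.mem_pyRange_one] at hi
      apply List.map_congr_left
      intro j hj
      rw [PySem.List.mem_pyRange_one] at hj
      rw [if_neg]
      omega
  · rw [if_neg hg1, pv_Bgrid_zero]
    apply List.map_congr_left
    intro i hi
    rw [PySem.List.mem_pyRange_one] at hi
    apply List.map_congr_left
    intro j hj
    rw [PySem.List.mem_pyRange_one] at hj
    rw [if_neg]
    omega

theorem pv_core_ne (b1 b2 b3 b4 v : Int)
    (hb : -4 ≤ b1 ∧ b3 ≤ 3 ∧ -5 ≤ b2 ∧ b4 ≤ 4) (h13 : b1 ≤ b3) (h24 : b2 ≤ b4)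
    (hv : v ≠ 0) (hw : (b1 < 0 ∧ b3 < 3) ∨ (b2 < 0 ∧ b4 < 4)) :
    (PySem.List.pyRange b1 (b3 + 1) 1).foldl
        (fun acc i =>
          (PySem.List.pyRange b2 (b4 + 1) 1).foldl
            (fun acc2 j => pvSetCell (pvSetCell (pvSetCell (pvSetCell acc2 i j v) i j v) i j v) i j v)
            acc)
        ((PySem.List.pyRange 0 4 1).foldl (fun acc i =>
          (PySem.List.pyRange 0 5 1).foldl (fun acc2 _j =>
            PySem.List.pySetD acc2 i (PySem.List.pyGetD acc2 i [] ++ [0])) acc) [[], [], [], []])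
      ≠ (PySem.List.pyRange 0 4 1).map (fun i =>
          (PySem.List.pyRange 0 5 1).map (fun j =>
            if b1 ≤ i ∧ i ≤ b3 ∧ b2 ≤ j ∧ j ≤ b4 then v else 0)) := by
  rw [pv_A_map b1 b2 b3 b4 v hb h13 h24]
  obtain ⟨r, j, hr0, hr4, hj0, hj5, hwrapr, hwrapj, hrect⟩ :
      ∃ r j : Int, 0 ≤ r ∧ r < 4 ∧ 0 ≤ j ∧ j < 5 ∧
        ((b1 ≤ r ∧ r ≤ b3) ∨ (b1 ≤ r - 4 ∧ r - 4 ≤ b3)) ∧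
        ((b2 ≤ j ∧ j ≤ b4) ∨ (b2 ≤ j - 5 ∧ j - 5 ≤ b4)) ∧
        ¬(b1 ≤ r ∧ r ≤ b3 ∧ b2 ≤ j ∧ j ≤ b4) := by
    rcases hw with ⟨hw1, hw2⟩ | ⟨hw1, hw2⟩
    · refine ⟨if -1 ≤ b3 then 3 else b1 + 4, if 0 ≤ b2 then b2 else b2 + 5, ?_⟩
      split_ifs <;> refine ⟨by omega, by omega, by omega, by omega, ?_, ?_, by omega⟩ <;> omega
    · refine ⟨if 0 ≤ b1 then b1 else b1 + 4, if -1 ≤ b4 then 4 else b2 + 5, ?_⟩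
      split_ifs <;> refine ⟨by omega, by omega, by omega, by omega, ?_, ?_, by omega⟩ <;> omega
  intro heq
  have h1 := congrArg (fun g => PySem.List.pyGetD (PySem.List.pyGetD g r []) j (0:Int)) heq
  dsimp only at h1
  rw [PySem.List.pyGetD_map_pyRange_of_nonneg _ 4 r [] (by omega) (by omega),
    PySem.List.pyGetD_map_pyRange_of_nonneg _ 4 r [] (by omega) (by omega),
    if_pos (by simpa using hwrapr), pv_row_eq b2 b4 v (by omega),
    PySem.List.pyGetD_map_pyRange_of_nonneg _ 5 j (0:Int) (by omega) (by omega),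
    PySem.List.pyGetD_map_pyRange_of_nonneg _ 5 j (0:Int) (by omega) (by omega),
    if_pos hwrapj, if_neg hrect] at h1
  exact hv h1

-- ===== VERDICT (by name: the statement is the Claim_ definition above) =====
theorem skilling_spec : Claim_unchanged_skilling := by
  intro skill hdom hpre hnd
  obtain ⟨hlen4, h01, hshape⟩ := hpre
  beta_reduce at h01 hshape
  have hD : ¬ (skill.getD 1 0 ≤ skill.getD 3 0 ∧ skill.getD 2 0 ≤ skill.getD 4 0 ∧
      skill.getD 5 0 ≠ 0 ∧
      ((skill.getD 1 0 < 0 ∧ skill.getD 3 0 < 3) ∨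
       (skill.getD 2 0 < 0 ∧ skill.getD 4 0 < 4))) := fun hc => hnd hc
  simp only [skilling, skilling_alt, PySem.List.pyGetD_ofNat']
  by_cases h0 : skill.getD 0 0 = 1
  · have hlen : 6 ≤ skill.length := h01 h0
    rcases skill with _ | ⟨x0, skill⟩; · simp at hlen
    rcases skill with _ | ⟨x1, skill⟩; · simp at hlen
    rcases skill with _ | ⟨x2, skill⟩; · simp at hlen
    rcases skill with _ | ⟨x3, skill⟩; · simp at hlen
    rcases skill with _ | ⟨x4, skill⟩; · simp at hlen
    rcases skill with _ | ⟨x5, rest⟩; · simp at hlen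
    simp only [List.getD_cons_zero, List.getD_cons_succ] at hshape hD h0
    simp only [List.length_cons] at hshape
    have hset : PySem.List.pySetD (x0::x1::x2::x3::x4::x5::rest) 5 (x5 * -1)
        = x0::x1::x2::x3::x4::(x5 * -1)::rest := by
      rw [PySem.List.pySetD_of_nonneg _ _ (by omega : (0:Int) ≤ 5)]
      rfl
    simp only [List.getD_cons_zero, List.getD_cons_succ, if_pos h0, hset]
    rw [pv_B x1 x2 x3 x4 (x5 * -1)]
    exact pv_core x1 x2 x3 x4 (x5 * -1) (by omega) (by omega)
  · rw [if_neg h0, pv_B]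
    exact pv_core (skill.getD 1 0) (skill.getD 2 0) (skill.getD 3 0) (skill.getD 4 0)
      (skill.getD 5 0) (by omega) (by omega)

set_option maxRecDepth 40000 in
theorem skilling_changed : Claim_changed_skilling := by
  unfold Claim_changed_skilling; decide

theorem skilling_tight : Claim_exact_skilling := by
  intro skill hdom hpre hD'
  obtain ⟨hlen4, h01, hshape⟩ := hpre
  beta_reduce at h01 hshape
  obtain ⟨h13, h24, hv5, hwrap⟩ := hD'
  beta_reduce at h13 h24 hv5 hwrap
  simp only [skilling, skilling_alt, PySem.List.pyGetD_ofNat']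
  by_cases h0 : skill.getD 0 0 = 1
  · have hlen : 6 ≤ skill.length := h01 h0
    rcases skill with _ | ⟨x0, skill⟩; · simp at hlen
    rcases skill with _ | ⟨x1, skill⟩; · simp at hlen
    rcases skill with _ | ⟨x2, skill⟩; · simp at hlen
    rcases skill with _ | ⟨x3, skill⟩; · simp at hlen
    rcases skill with _ | ⟨x4, skill⟩; · simp at hlen
    rcases skill with _ | ⟨x5, rest⟩; · simp at hlen
    simp only [List.getD_cons_zero, List.getD_cons_succ] at hshape h0 h13 h24 hv5 hwrap
    simp only [List.length_cons] at hshape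
    have hset : PySem.List.pySetD (x0::x1::x2::x3::x4::x5::rest) 5 (x5 * -1)
        = x0::x1::x2::x3::x4::(x5 * -1)::rest := by
      rw [PySem.List.pySetD_of_nonneg _ _ (by omega : (0:Int) ≤ 5)]
      rfl
    simp only [List.getD_cons_zero, List.getD_cons_succ, if_pos h0, hset]
    rw [pv_B x1 x2 x3 x4 (x5 * -1)]
    exact pv_core_ne x1 x2 x3 x4 (x5 * -1) (by omega) h13 h24 (by omega) hwrap
  · rw [if_neg h0, pv_B]
    exact pv_core_ne (skill.getD 1 0) (skill.getD 2 0) (skill.getD 3 0) (skill.getD 4 0)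
      (skill.getD 5 0) (by omega) h13 h24 hv5 hwrap
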